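-- pv_equiv track=rewrite | github.com/S0ngRu1/data-factory-songrui-job | test/gpt_ner_sentence_to_bio.py | gpt_ner_sentence_to_bio
-- ===== SOURCE A (Python) =====
-- from typing import List, Dict
--
-- def get_entity_from_kg(kg_nodes:Dict,sentence:str):
--     result = {}
--     for node,cate in kg_nodes.items():
--         if node in sentence:
--             result[node] = cate
--     return result
--
-- def gpt_ner_sentence_to_bio(sentence:str, kg_nodes:Dict)->List:
--     """
--     Convert a sentence into BIO format based on the knowledge graph nodes.
--     """
--     bio_annotations = ["O"] * len(sentence)
--     annotations = get_entity_from_kg(kg_nodes,sentence)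
--
--     for text, label in annotations.items():
--         if not text:
--             continue
--         if label:
--             start_idx = 0
--             while start_idx < len(sentence):
--                 start_idx = sentence.find(text, start_idx)
--                 if start_idx == -1:
--                     break
--                 for idx in range(len(text)):
--                     if bio_annotations[start_idx + idx] == "O":
--                         if idx == 0:
--                             bio_annotations[start_idx + idx] = f"B-{label}"
--                         else:
--                             bio_annotations[start_idx + idx] = f"I-{label}"
--                 start_idx += len(text)
--
--     final_annotations = []
--     for idx, char in enumerate(sentence):
--         final_annotations.append(f"{char}\t{bio_annotations[idx]}")
--     return final_annotations
-- ===== SOURCE B (Python) =====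
-- def gpt_ner_sentence_to_bio(sentence, kg_nodes):
--     """BIO-tag sentence: collect all greedy non-overlapping match spans per
--     knowledge-graph node, then paint tags by slice assignment in reverse node
--     order (last write wins = first node wins per cell)."""
--     n = len(sentence)
--     spans = []
--     for text, label in kg_nodes.items():
--         if text and label and text in sentence:
--             L = len(text)
--             i = sentence.find(text)
--             while i != -1:
--                 spans.append((i, L, label))
--                 i = sentence.find(text, i + L)
--     tags = ["O"] * n
--     for start, L, label in reversed(spans):
--         tags[start:start + L] = ["B-" + label] + ["I-" + label] * (L - 1)
--     return [c + "\t" + t for c, t in zip(sentence, tags)]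
-- ===== Notes on version B (the rewrite author's own statement) =====
-- stated objective: alternative
-- what changed: B first collects all greedy non-overlapping match spans of every node in one pass per node, then paints the tag array by whole-slice assignment iterating the spans in reverse order (last write wins = first node wins per cell), instead of A's per-character 'only if still O' guarded writes interleaved with the scan; output lines are built with zip instead of enumerate+indexing.
import Mathlib
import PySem

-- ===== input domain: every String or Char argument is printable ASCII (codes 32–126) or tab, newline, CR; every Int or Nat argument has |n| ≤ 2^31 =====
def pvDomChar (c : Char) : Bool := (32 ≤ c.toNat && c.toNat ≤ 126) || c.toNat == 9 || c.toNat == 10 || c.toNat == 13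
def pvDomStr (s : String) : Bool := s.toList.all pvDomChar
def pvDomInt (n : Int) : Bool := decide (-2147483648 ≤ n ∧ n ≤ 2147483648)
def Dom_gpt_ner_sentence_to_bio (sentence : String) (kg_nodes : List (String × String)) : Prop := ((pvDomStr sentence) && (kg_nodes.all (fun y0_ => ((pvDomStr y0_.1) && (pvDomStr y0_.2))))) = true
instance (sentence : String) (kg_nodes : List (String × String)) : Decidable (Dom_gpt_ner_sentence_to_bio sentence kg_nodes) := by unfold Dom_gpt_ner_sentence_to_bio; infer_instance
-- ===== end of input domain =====

-- B collects every node's greedy match spans first and paints the tag array by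
-- reverse-order slice assignment (last write wins = first node wins per cell)
-- instead of A's per-character 'only if still O' guarded writes (objective: alternative).

-- input decoding shared by both ports: the Python argument kg_nodes is a dict,
-- built here from the association list (later duplicate keys overwrite in place)
def pvDict (kg_nodes : List (String × String)) : PySem.Dict String String :=
  kg_nodes.foldl (fun d p => d.insert p.1 p.2) PySem.Dict.empty

-- ===== PORT A =====
def get_entity_from_kg (kg_nodes : PySem.Dict String String) (sentence : String) : PySem.Dict String String :=
  kg_nodes.items.foldl (fun result p =>
    if PySem.Str.isIn p.1 sentence then result.insert p.1 p.2 else result) PySem.Dict.empty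

-- A's inner 'for idx in range(len(text))'; every read/write is in range at every call site
def pvAWrite (bio : List String) (start : Nat) (L : Nat) (label : String) : List String :=
  (List.range L).foldl (fun b idx =>
    if b.getD (start + idx) "" = "O" then
      b.set (start + idx) (if idx = 0 then "B-" ++ label else "I-" ++ label)
    else b) bio

-- A's 'while start_idx < len(sentence)' find loop; fuel (≥ len+1 at the call site)
-- only makes the recursion structural: start_idx strictly grows every turn
def pvALoop (fuel : Nat) (s text : List Char) (label : String) (bio : List String) (start : Nat) : List String :=
  match fuel with
  | 0 => bio
  | fuel + 1 =>
    if start < s.length then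
      let r := PySem.Chars.findFrom s text (start : Int) none
      if r = -1 then bio
      else pvALoop fuel s text label (pvAWrite bio r.toNat text.length label) (r.toNat + text.length)
    else bio

def gpt_ner_sentence_to_bio (sentence : String) (kg_nodes : List (String × String)) : List String :=
  let s := sentence.toList
  let bio0 := List.replicate s.length "O"
  let annotations := get_entity_from_kg (pvDict kg_nodes) sentence
  let bio := annotations.items.foldl (fun b p =>
    if p.1 = "" then b
    else if p.2 ≠ "" then pvALoop (s.length + 1) s p.1.toList p.2 b 0
    else b) bio0
  (PySem.List.enumerate s).foldl
    (fun acc p => acc ++ [String.ofList [p.2] ++ "\t" ++ PySem.List.pyGetD bio p.1 ""]) []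

-- ===== PORT B =====
-- B's 'while i != -1' span-collecting find loop (fuel ≥ len+1 at the call site)
def pvBFind (fuel : Nat) (s text : List Char) (L : Nat) (label : String) (i : Int)
    (spans : List (Nat × Nat × String)) : List (Nat × Nat × String) :=
  match fuel with
  | 0 => spans
  | fuel + 1 =>
    if i = -1 then spans
    else pvBFind fuel s text L label (PySem.Chars.findFrom s text (i + L) none)
      (spans ++ [(i.toNat, L, label)])

def gpt_ner_sentence_to_bio_alt (sentence : String) (kg_nodes : List (String × String)) : List String :=
  let s := sentence.toList
  let n := s.length
  let spans := (pvDict kg_nodes).items.foldl (fun acc p =>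
    if p.1 ≠ "" ∧ p.2 ≠ "" ∧ PySem.Str.isIn p.1 sentence then
      pvBFind (n + 1) s p.1.toList p.1.toList.length p.2 (PySem.Chars.find s p.1.toList) acc
    else acc) []
  -- tags[start:start+L] = ["B-"+label] + ["I-"+label]*(L-1): exact for this
  -- in-bounds, length-preserving splice
  let tags := spans.reverse.foldl (fun t sp =>
    t.take sp.1 ++ (("B-" ++ sp.2.2) :: List.replicate (sp.2.1 - 1) ("I-" ++ sp.2.2))
      ++ t.drop (sp.1 + sp.2.1)) (List.replicate n "O")
  (s.zip tags).map (fun p => String.ofList [p.1] ++ "\t" ++ p.2)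

-- ===== PRECONDITION & SPEC =====
def Spec_gpt_ner_sentence_to_bio (sentence : String) (kg_nodes : List (String × String)) (out : List String) : Prop := out = gpt_ner_sentence_to_bio_alt sentence kg_nodes
instance (sentence : String) (kg_nodes : List (String × String)) (out : List String) : Decidable (Spec_gpt_ner_sentence_to_bio sentence kg_nodes out) := by unfold Spec_gpt_ner_sentence_to_bio; infer_instance

-- ===== CLAIM (what is proved, stated in full; the proofs are below) =====
def Claim_equal_gpt_ner_sentence_to_bio : Prop := ∀ (sentence : String) (kg_nodes : List (String × String)), Dom_gpt_ner_sentence_to_bio sentence kg_nodes → Spec_gpt_ner_sentence_to_bio sentence kg_nodes (gpt_ner_sentence_to_bio sentence kg_nodes)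

-- ===== LEMMAS AND PROOFS =====

-- the greedy non-overlapping occurrence starts of text in s, from start on
def pvOccs (fuel : Nat) (s text : List Char) (start : Nat) : List Nat :=
  match fuel with
  | 0 => []
  | fuel + 1 =>
    let r := PySem.Chars.findFrom s text (start : Int) none
    if r = -1 then [] else r.toNat :: pvOccs fuel s text (r.toNat + text.length)

def pvTag (sp : Nat × Nat × String) (i : Nat) : String :=
  if i = sp.1 then "B-" ++ sp.2.2 else "I-" ++ sp.2.2

-- the tag of the first span covering position i, if any
def pvFC : List (Nat × Nat × String) → Nat → Option String
  | [], _ => none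
  | sp :: rest, i => if sp.1 ≤ i ∧ i < sp.1 + sp.2.1 then some (pvTag sp i) else pvFC rest i

def pvSpansOf (s : List Char) (sentence : String) (p : String × String) : List (Nat × Nat × String) :=
  if p.1 ≠ "" ∧ p.2 ≠ "" ∧ PySem.Str.isIn p.1 sentence then
    (pvOccs (s.length + 1) s p.1.toList 0).map (fun st => (st, p.1.toList.length, p.2))
  else []

def pvApplyA (spans : List (Nat × Nat × String)) (bio : List String) : List String :=
  spans.foldl (fun b sp => pvAWrite b sp.1 sp.2.1 sp.2.2) bio

def pvSplice (t : List String) (sp : Nat × Nat × String) : List String :=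
  t.take sp.1 ++ (("B-" ++ sp.2.2) :: List.replicate (sp.2.1 - 1) ("I-" ++ sp.2.2))
    ++ t.drop (sp.1 + sp.2.1)

lemma pv_toList_ne_nil {s : String} (h : s ≠ "") : s.toList ≠ [] := by
  intro hn; apply h
  have := congrArg String.ofList hn
  simpa using this

lemma pv_tag_ne_O (sp : Nat × Nat × String) (i : Nat) : pvTag sp i ≠ "O" := by
  unfold pvTag
  split <;>
  · intro h
    have := congrArg String.toList h
    simp [String.toList_append] at this

lemma pv_findFrom_len (s text : List Char) (h : text ≠ []) :
    PySem.Chars.findFrom s text (s.length : Int) none = -1 := by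
  rw [PySem.Chars.findFrom_natCast s text s.length le_rfl]
  have hf : PySem.Chars.find ([] : List Char) text = -1 := by
    rw [PySem.Chars.find_eq_neg_one_iff]
    simp [h]
  simp [List.drop_length, hf]

lemma pv_find_step (s text : List Char) (start : Nat) (hs : start ≤ s.length) (h : text ≠ [])
    (hr : PySem.Chars.findFrom s text (start : Int) none ≠ -1) :
    (start : Int) ≤ PySem.Chars.findFrom s text (start : Int) none ∧
    (PySem.Chars.findFrom s text (start : Int) none).toNat + text.length ≤ s.length := by
  obtain ⟨h1, h2, -⟩ := PySem.Chars.findFrom_natCast_spec s text start hs hr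
  refine ⟨h1, ?_⟩
  have hlen := h2.length_le
  have hne : 1 ≤ text.length := by
    cases text with
    | nil => exact absurd rfl h
    | cons a l => simp
  simp [List.length_drop] at hlen
  omega

lemma pv_occs_bounds (fuel : Nat) (s text : List Char) (start : Nat) (h : text ≠ [])
    (hs : start ≤ s.length) :
    ∀ st ∈ pvOccs fuel s text start, start ≤ st ∧ st + text.length ≤ s.length := by
  induction fuel generalizing start with
  | zero => intro st hst; simp [pvOccs] at hst
  | succ fuel ih =>
    intro st hst
    rw [pvOccs] at hst
    by_cases hr : PySem.Chars.findFrom s text (start : Int) none = -1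
    · simp [hr] at hst
    · simp only [hr, reduceIte] at hst
      obtain ⟨h1, h2⟩ := pv_find_step s text start hs h hr
      rcases List.mem_cons.mp hst with rfl | hmem
      · exact ⟨by omega, h2⟩
      · have := ih ((PySem.Chars.findFrom s text (start : Int) none).toNat + text.length) h2 st hmem
        omega

lemma pv_aloop_eq (fuel : Nat) (s text : List Char) (label : String) (bio : List String)
    (start : Nat) (h : text ≠ []) (hs : start ≤ s.length) (hf : s.length - start < fuel) :
    pvALoop fuel s text label bio start =
      pvApplyA ((pvOccs fuel s text start).map (fun st => (st, text.length, label))) bio := by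
  induction fuel generalizing start bio with
  | zero => omega
  | succ fuel ih =>
    rw [pvALoop, pvOccs]
    by_cases hlt : start < s.length
    · simp only [hlt, if_true]
      by_cases hr : PySem.Chars.findFrom s text (start : Int) none = -1
      · simp [hr, pvApplyA]
      · simp only [hr, reduceIte]
        obtain ⟨h1, h2⟩ := pv_find_step s text start hs h hr
        have hne : 1 ≤ text.length := by
          cases text with
          | nil => exact absurd rfl h
          | cons a l => simp
        rw [ih _ _ h2 (by omega)]
        simp [pvApplyA]
    · have hse : start = s.length := by omega
      subst hse
      rw [pv_findFrom_len s text h]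
      simp [pvApplyA]

lemma pv_bfind_eq (fuel : Nat) (s text : List Char) (label : String) (start : Nat)
    (acc : List (Nat × Nat × String)) (h : text ≠ []) (hs : start ≤ s.length) :
    pvBFind fuel s text text.length label (PySem.Chars.findFrom s text (start : Int) none) acc =
      acc ++ (pvOccs fuel s text start).map (fun st => (st, text.length, label)) := by
  induction fuel generalizing start acc with
  | zero => simp [pvBFind, pvOccs]
  | succ fuel ih =>
    rw [pvBFind, pvOccs]
    by_cases hr : PySem.Chars.findFrom s text (start : Int) none = -1
    · simp [hr]
    · simp only [hr, reduceIte]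
      obtain ⟨h1, h2⟩ := pv_find_step s text start hs h hr
      have hcast : PySem.Chars.findFrom s text (start : Int) none + (text.length : Int) =
          (((PySem.Chars.findFrom s text (start : Int) none).toNat + text.length : Nat) : Int) := by
        omega
      rw [hcast, ih _ _ h2]
      simp

lemma pv_nodup_aux (l : List (String × String)) (d : PySem.Dict String String)
    (hd : d.keys.Nodup) :
    (l.foldl (fun d p => d.insert p.1 p.2) d).keys.Nodup := by
  induction l generalizing d with
  | nil => exact hd
  | cons p l ih => exact ih _ (PySem.Dict.nodup_keys_insert _ _ _ hd)

lemma pv_dict_nodup (kg_nodes : List (String × String)) : (pvDict kg_nodes).keys.Nodup := by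
  exact pv_nodup_aux kg_nodes PySem.Dict.empty (by simp [PySem.Dict.keys_empty])

lemma pv_fold_insert_filter (q : String × String → Bool) (l : List (String × String))
    (d : PySem.Dict String String) (h1 : ∀ p ∈ l, d.contains p.1 = false)
    (h2 : (l.map Prod.fst).Nodup) :
    (l.foldl (fun r p => if q p then r.insert p.1 p.2 else r) d).items =
      d.items ++ l.filter q := by
  induction l generalizing d with
  | nil => simp
  | cons p l ih =>
    simp only [List.foldl_cons, List.filter_cons]
    have hp : d.contains p.1 = false := h1 p (by simp)
    have hnotin : p.1 ∉ l.map Prod.fst := by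
      simp only [List.map_cons, List.nodup_cons] at h2
      exact h2.1
    have h2' : (l.map Prod.fst).Nodup := by
      simp only [List.map_cons, List.nodup_cons] at h2
      exact h2.2
    by_cases hq : q p
    · simp only [hq, if_true]
      rw [ih (d.insert p.1 p.2) ?_ h2']
      · rw [PySem.Dict.items_insert_of_not_contains _ _ hp]
        simp
      · intro p' hp'
        rw [PySem.Dict.contains_insert]
        have : p'.1 ≠ p.1 := by
          intro he
          exact hnotin (he ▸ List.mem_map_of_mem hp')
        simp [this, h1 p' (by simp [hp'])]
    · simp only [hq, Bool.false_eq_true, if_false]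
      exact ih d (fun p' hp' => h1 p' (by simp [hp'])) h2'

lemma pv_awrite_length (bio : List String) (start L : Nat) (label : String) :
    (pvAWrite bio start L label).length = bio.length := by
  unfold pvAWrite
  generalize List.range L = l
  induction l generalizing bio with
  | nil => rfl
  | cons x xs ih =>
    simp only [List.foldl_cons]
    rw [ih]
    split <;> simp

lemma pv_awrite_succ (bio : List String) (start L : Nat) (label : String) :
    pvAWrite bio start (L + 1) label =
      (if (pvAWrite bio start L label).getD (start + L) "" = "O" then
        (pvAWrite bio start L label).set (start + L)
          (if L = 0 then "B-" ++ label else "I-" ++ label)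
      else pvAWrite bio start L label) := by
  unfold pvAWrite
  rw [List.range_succ, List.foldl_append]
  rfl

lemma pv_awrite_get (bio : List String) (start L : Nat) (label : String) (i : Nat)
    (hb : start + L ≤ bio.length) :
    (pvAWrite bio start L label)[i]? =
      if start ≤ i ∧ i < start + L ∧ bio[i]? = some "O"
      then some (pvTag (start, L, label) i) else bio[i]? := by
  induction L generalizing i with
  | zero =>
    rw [if_neg (by rintro ⟨h1, h2, -⟩; omega)]
    simp [pvAWrite]
  | succ L ih =>
    have hb' : start + L ≤ bio.length := by omega
    have hin : start + L < bio.length := by omega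
    rw [pv_awrite_succ]
    have hpl : (pvAWrite bio start L label)[start + L]? = bio[start + L]? := by
      rw [ih _ hb']
      rw [if_neg (by rintro ⟨h1, h2, -⟩; omega)]
    have hgd : (pvAWrite bio start L label).getD (start + L) "" =
        (bio[start + L]?).getD "" := by
      rw [List.getD_eq_getElem?_getD, hpl]
    have hsome : bio[start + L]? = some bio[start + L] := List.getElem?_eq_getElem hin
    by_cases hO : bio[start + L] = "O"
    · rw [hgd]
      simp only [hsome, Option.getD_some]
      rw [if_pos hO]
      by_cases hi : i = start + L
      · subst hi
        rw [List.getElem?_set_self (by rw [pv_awrite_length]; omega)]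
        rw [if_pos (show start ≤ start + L ∧ start + L < start + (L + 1) ∧
            bio[start + L]? = some "O" from ⟨by omega, by omega, by rw [hsome, hO]⟩)]
        simp only [pvTag]
        by_cases hL : L = 0
        · simp [hL]
        · rw [if_neg hL, if_neg (by omega)]
      · rw [List.getElem?_set_ne (by omega : start + L ≠ i), ih _ hb']
        have hiff : (start ≤ i ∧ i < start + L ∧ bio[i]? = some "O") ↔
            (start ≤ i ∧ i < start + (L + 1) ∧ bio[i]? = some "O") := by
          constructor
          · rintro ⟨a, b, c⟩; exact ⟨a, by omega, c⟩
          · rintro ⟨a, b, c⟩; exact ⟨a, by omega, c⟩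
        simp only [hiff]
        rfl
    · rw [hgd]
      simp only [hsome, Option.getD_some]
      rw [if_neg hO, ih _ hb']
      have hiff : (start ≤ i ∧ i < start + L ∧ bio[i]? = some "O") ↔
          (start ≤ i ∧ i < start + (L + 1) ∧ bio[i]? = some "O") := by
        constructor
        · rintro ⟨a, b, c⟩; exact ⟨a, by omega, c⟩
        · rintro ⟨a, b, c⟩
          refine ⟨a, ?_, c⟩
          rcases Nat.lt_or_ge i (start + L) with h | h
          · exact h
          · exfalso
            have hieq : i = start + L := by omega
            rw [hieq, hsome] at c
            exact hO (Option.some.inj c)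
      simp only [hiff]
      rfl

lemma pv_applyA_get_ne (spans : List (Nat × Nat × String)) (bio : List String) (i : Nat)
    (hb : ∀ sp ∈ spans, sp.1 + sp.2.1 ≤ bio.length) (hi : bio[i]? ≠ some "O") :
    (pvApplyA spans bio)[i]? = bio[i]? := by
  induction spans generalizing bio with
  | nil => rfl
  | cons sp rest ih =>
    simp only [pvApplyA, List.foldl_cons] at ih ⊢
    have hb0 : sp.1 + sp.2.1 ≤ bio.length := hb sp (by simp)
    have hget := pv_awrite_get bio sp.1 sp.2.1 sp.2.2 i hb0
    rw [if_neg (by tauto)] at hget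
    rw [ih _ ?_ (by rw [hget]; exact hi), hget]
    intro sp' hsp'
    rw [pv_awrite_length]
    exact hb sp' (by simp [hsp'])

lemma pv_applyA_get_O (spans : List (Nat × Nat × String)) (bio : List String) (i : Nat)
    (hb : ∀ sp ∈ spans, sp.1 + sp.2.1 ≤ bio.length) (hi : bio[i]? = some "O") :
    (pvApplyA spans bio)[i]? = some ((pvFC spans i).getD "O") := by
  induction spans generalizing bio with
  | nil => simp [pvApplyA, pvFC, hi]
  | cons sp rest ih =>
    have hb0 : sp.1 + sp.2.1 ≤ bio.length := hb sp (by simp)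
    have hb' : ∀ sp' ∈ rest, sp'.1 + sp'.2.1 ≤ (pvAWrite bio sp.1 sp.2.1 sp.2.2).length := by
      intro sp' hsp'
      rw [pv_awrite_length]
      exact hb sp' (by simp [hsp'])
    have hget := pv_awrite_get bio sp.1 sp.2.1 sp.2.2 i hb0
    simp only [pvApplyA, List.foldl_cons] at ih ⊢
    by_cases hcov : sp.1 ≤ i ∧ i < sp.1 + sp.2.1
    · rw [if_pos (show sp.1 ≤ i ∧ i < sp.1 + sp.2.1 ∧ bio[i]? = some "O" from
        ⟨hcov.1, hcov.2, hi⟩)] at hget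
      have hne : (pvAWrite bio sp.1 sp.2.1 sp.2.2)[i]? ≠ some "O" := by
        rw [hget]
        intro hcon
        exact pv_tag_ne_O sp i (Option.some.inj hcon)
      have hres := pv_applyA_get_ne rest (pvAWrite bio sp.1 sp.2.1 sp.2.2) i hb' hne
      simp only [pvApplyA] at hres
      rw [hres, hget, pvFC, if_pos hcov]
      rfl
    · rw [if_neg (by tauto)] at hget
      rw [ih _ hb' (by rw [hget]; exact hi)]
      rw [pvFC, if_neg hcov]

lemma pv_splice_length (t : List String) (sp : Nat × Nat × String)
    (h1 : sp.1 + sp.2.1 ≤ t.length) (h2 : 1 ≤ sp.2.1) :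
    (pvSplice t sp).length = t.length := by
  unfold pvSplice
  simp only [List.length_append, List.length_take, List.length_cons, List.length_replicate,
    List.length_drop]
  omega

lemma pv_splice_get (t : List String) (sp : Nat × Nat × String) (i : Nat)
    (h1 : sp.1 + sp.2.1 ≤ t.length) (h2 : 1 ≤ sp.2.1) :
    (pvSplice t sp)[i]? =
      if sp.1 ≤ i ∧ i < sp.1 + sp.2.1 then some (pvTag sp i) else t[i]? := by
  unfold pvSplice
  have hlt : (List.take sp.1 t).length = sp.1 := by simp; omega
  have hlm : (List.take sp.1 t ++
      (("B-" ++ sp.2.2) :: List.replicate (sp.2.1 - 1) ("I-" ++ sp.2.2))).length = sp.1 + sp.2.1 := by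
    simp only [List.length_append, List.length_cons, List.length_replicate, hlt]
    omega
  by_cases hc : sp.1 ≤ i ∧ i < sp.1 + sp.2.1
  · rw [if_pos hc]
    rw [List.getElem?_append_left (by omega)]
    rw [List.getElem?_append_right (by omega)]
    rw [hlt]
    obtain ⟨k, rfl⟩ : ∃ k, i = sp.1 + k := ⟨i - sp.1, by omega⟩
    simp only [Nat.add_sub_cancel_left]
    cases k with
    | zero => simp [pvTag]
    | succ j =>
      rw [List.getElem?_cons_succ]
      rw [List.getElem?_replicate]
      rw [if_pos (by omega)]
      unfold pvTag
      rw [if_neg (by omega)]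
  · rw [if_neg hc]
    by_cases hlo : i < sp.1
    · rw [List.getElem?_append_left (by omega), List.getElem?_append_left (by rw [hlt]; omega)]
      exact List.getElem?_take_of_lt hlo
    · rw [List.getElem?_append_right (by omega), hlm]
      rw [List.getElem?_drop]
      congr 1
      omega

lemma pv_applyB_length (spans : List (Nat × Nat × String)) (t : List String)
    (hb : ∀ sp ∈ spans, sp.1 + sp.2.1 ≤ t.length ∧ 1 ≤ sp.2.1) :
    (spans.reverse.foldl pvSplice t).length = t.length := by
  induction spans with
  | nil => rfl
  | cons sp rest ih =>
    rw [List.reverse_cons, List.foldl_append]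
    simp only [List.foldl_cons, List.foldl_nil]
    have ihl := ih (fun sp' h => hb sp' (by simp [h]))
    rw [pv_splice_length _ _ (by rw [ihl]; exact (hb sp (by simp)).1) (hb sp (by simp)).2, ihl]

lemma pv_applyB_get (spans : List (Nat × Nat × String)) (t : List String) (i : Nat)
    (hb : ∀ sp ∈ spans, sp.1 + sp.2.1 ≤ t.length ∧ 1 ≤ sp.2.1) :
    (spans.reverse.foldl pvSplice t)[i]? =
      match pvFC spans i with | some v => some v | none => t[i]? := by
  induction spans with
  | nil => rfl
  | cons sp rest ih =>
    have hb' : ∀ sp' ∈ rest, sp'.1 + sp'.2.1 ≤ t.length ∧ 1 ≤ sp'.2.1 :=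
      fun sp' h => hb sp' (by simp [h])
    have hlen := pv_applyB_length rest t hb'
    rw [List.reverse_cons, List.foldl_append]
    simp only [List.foldl_cons, List.foldl_nil]
    rw [pv_splice_get _ _ _ (by rw [hlen]; exact (hb sp (by simp)).1) (hb sp (by simp)).2]
    rw [pvFC]
    by_cases hcov : sp.1 ≤ i ∧ i < sp.1 + sp.2.1
    · rw [if_pos hcov, if_pos hcov]
    · rw [if_neg hcov, if_neg hcov, ih hb']

lemma pv_fc_none (spans : List (Nat × Nat × String)) (i n : Nat)
    (hb : ∀ sp ∈ spans, sp.1 + sp.2.1 ≤ n) (hi : n ≤ i) : pvFC spans i = none := by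
  induction spans with
  | nil => rfl
  | cons sp rest ih =>
    rw [pvFC, if_neg (by rintro ⟨-, h2⟩; have := hb sp (by simp); omega)]
    exact ih (fun sp' h => hb sp' (by simp [h]))

lemma pv_apply_eq (spans : List (Nat × Nat × String)) (n : Nat)
    (hb : ∀ sp ∈ spans, sp.1 + sp.2.1 ≤ n ∧ 1 ≤ sp.2.1) :
    pvApplyA spans (List.replicate n "O") =
      spans.reverse.foldl pvSplice (List.replicate n "O") := by
  apply List.ext_getElem?
  intro i
  have hrepl : (List.replicate n "O").length = n := List.length_replicate
  rw [pv_applyB_get spans _ i (fun sp h => ⟨by rw [hrepl]; exact (hb sp h).1, (hb sp h).2⟩)]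
  by_cases hi : i < n
  · have h0 : (List.replicate n "O")[i]? = some "O" := by
      simp [hi]
    rw [pv_applyA_get_O spans _ i (fun sp h => by rw [hrepl]; exact (hb sp h).1) h0]
    cases hfc : pvFC spans i with
    | none => simp [h0]
    | some v => simp
  · have h0 : (List.replicate n "O")[i]? = none := by
      simp [List.getElem?_replicate]; omega
    rw [pv_applyA_get_ne spans _ i (fun sp h => by rw [hrepl]; exact (hb sp h).1)
      (by rw [h0]; simp)]
    rw [pv_fc_none spans i n (fun sp h => (hb sp h).1) (by omega)]

lemma pv_spans_bounds (sentence : String) (l : List (String × String)) :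
    ∀ sp ∈ l.flatMap (pvSpansOf sentence.toList sentence),
      sp.1 + sp.2.1 ≤ sentence.toList.length ∧ 1 ≤ sp.2.1 := by
  intro sp hsp
  rw [List.mem_flatMap] at hsp
  obtain ⟨p, -, hmem⟩ := hsp
  unfold pvSpansOf at hmem
  split at hmem
  case isTrue hg =>
    rw [List.mem_map] at hmem
    obtain ⟨st, hst, rfl⟩ := hmem
    have htn : p.1.toList ≠ [] := pv_toList_ne_nil hg.1
    have := pv_occs_bounds _ _ _ 0 htn (by omega) st hst
    have hne : 1 ≤ p.1.toList.length := by
      cases hp : p.1.toList with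
      | nil => exact absurd hp htn
      | cons a l => simp
    exact ⟨this.2, hne⟩
  case isFalse => simp at hmem

lemma pv_a_fold (sentence : String) (l : List (String × String)) (b : List String) :
    (l.filter (fun p => PySem.Str.isIn p.1 sentence)).foldl (fun b p =>
      if p.1 = "" then b
      else if p.2 ≠ "" then
        pvALoop (sentence.toList.length + 1) sentence.toList p.1.toList p.2 b 0
      else b) b =
      pvApplyA (l.flatMap (pvSpansOf sentence.toList sentence)) b := by
  induction l generalizing b with
  | nil => rfl
  | cons p l ih =>
    rw [List.filter_cons, List.flatMap_cons]
    have happ : ∀ xs ys bb, pvApplyA (xs ++ ys) bb = pvApplyA ys (pvApplyA xs bb) :=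
      fun xs ys bb => List.foldl_append ..
    cases hq : PySem.Str.isIn p.1 sentence with
    | false =>
      have hsp : pvSpansOf sentence.toList sentence p = [] := by
        unfold pvSpansOf
        rw [if_neg (by rintro ⟨-, -, h3⟩; rw [hq] at h3; exact Bool.false_ne_true h3)]
      simp only [hsp, List.nil_append, Bool.false_eq_true, reduceIte]
      exact ih b
    | true =>
      simp only [reduceIte, List.foldl_cons]
      rw [happ, ← ih]
      congr 1
      unfold pvSpansOf
      by_cases h1 : p.1 = ""
      · rw [if_pos h1,
          if_neg (show ¬(p.1 ≠ "" ∧ p.2 ≠ "" ∧ PySem.Str.isIn p.1 sentence = true) from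
            fun hg => hg.1 h1)]
        rfl
      · by_cases h2 : p.2 = ""
        · rw [if_neg h1, if_neg (show ¬p.2 ≠ "" from by simp [h2]),
            if_neg (show ¬(p.1 ≠ "" ∧ p.2 ≠ "" ∧ PySem.Str.isIn p.1 sentence = true) from
              fun hg => hg.2.1 h2)]
          rfl
        · rw [if_neg h1, if_pos (show p.2 ≠ "" from h2)]
          rw [pv_aloop_eq _ _ _ _ _ 0 (pv_toList_ne_nil h1) (by omega) (by omega)]
          rw [if_pos (show p.1 ≠ "" ∧ p.2 ≠ "" ∧ PySem.Str.isIn p.1 sentence = true from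
            ⟨h1, h2, hq⟩)]
    
lemma pv_b_fold (sentence : String) (l : List (String × String))
    (acc : List (Nat × Nat × String)) :
    l.foldl (fun acc p =>
      if p.1 ≠ "" ∧ p.2 ≠ "" ∧ PySem.Str.isIn p.1 sentence then
        pvBFind (sentence.toList.length + 1) sentence.toList p.1.toList p.1.toList.length p.2
          (PySem.Chars.find sentence.toList p.1.toList) acc
      else acc) acc =
      acc ++ l.flatMap (pvSpansOf sentence.toList sentence) := by
  induction l generalizing acc with
  | nil => simp
  | cons p l ih =>
    rw [List.flatMap_cons, List.foldl_cons]
    by_cases hg : p.1 ≠ "" ∧ p.2 ≠ "" ∧ PySem.Str.isIn p.1 sentence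
    · rw [if_pos hg]
      have hfz : PySem.Chars.find sentence.toList p.1.toList =
          PySem.Chars.findFrom sentence.toList p.1.toList ((0 : Nat) : Int) none := by
        rw [Nat.cast_zero, PySem.Chars.findFrom_zero]
      rw [hfz, pv_bfind_eq _ _ _ _ 0 acc (pv_toList_ne_nil hg.1) (by omega)]
      rw [ih]
      have hsp : pvSpansOf sentence.toList sentence p =
          (pvOccs (sentence.toList.length + 1) sentence.toList p.1.toList 0).map
            (fun st => (st, p.1.toList.length, p.2)) := by
        unfold pvSpansOf; rw [if_pos hg]
      rw [hsp, List.append_assoc]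
    · rw [if_neg hg]
      have hsp : pvSpansOf sentence.toList sentence p = [] := by
        unfold pvSpansOf; rw [if_neg hg]
      rw [hsp, List.nil_append]
      exact ih acc

lemma pv_out_eq (s : List Char) (T : List String) (hT : T.length = s.length) :
    (PySem.List.enumerate s).foldl (fun acc p =>
      acc ++ [String.ofList [p.2] ++ "\t" ++ PySem.List.pyGetD T p.1 ""]) [] =
      (s.zip T).map (fun p => String.ofList [p.1] ++ "\t" ++ p.2) := by
  rw [PySem.List.foldl_append_singleton_eq_map]
  apply List.ext_getElem
  · simp [PySem.List.length_enumerate, hT]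
  · intro i h1 h2
    simp only [List.nil_append, List.getElem_map, PySem.List.getElem_enumerate, List.getElem_zip]
    have hi : i < T.length := by
      simp [PySem.List.length_enumerate] at h1
      omega
    have hg : PySem.List.pyGetD T ((0 : Int) + (i : Int)) "" = T[i] := by
      rw [zero_add, PySem.List.pyGetD_natCast]
      rw [List.getD_eq_getElem?_getD, List.getElem?_eq_getElem hi]
      rfl
    simp only [hg]

lemma pv_main (sentence : String) (kg_nodes : List (String × String)) :
    gpt_ner_sentence_to_bio sentence kg_nodes = gpt_ner_sentence_to_bio_alt sentence kg_nodes := by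
  unfold gpt_ner_sentence_to_bio gpt_ner_sentence_to_bio_alt
  dsimp only
  have hnodup : ((pvDict kg_nodes).items.map Prod.fst).Nodup := pv_dict_nodup kg_nodes
  have hfilter : (get_entity_from_kg (pvDict kg_nodes) sentence).items =
      (pvDict kg_nodes).items.filter (fun p => PySem.Str.isIn p.1 sentence) := by
    unfold get_entity_from_kg
    rw [pv_fold_insert_filter _ _ PySem.Dict.empty
      (fun p _ => PySem.Dict.contains_empty ..) hnodup]
    rfl
  rw [hfilter, pv_a_fold, pv_b_fold, List.nil_append]
  rw [pv_apply_eq _ _ (pv_spans_bounds sentence (pvDict kg_nodes).items)]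
  have hblen : (((pvDict kg_nodes).items.flatMap
      (pvSpansOf sentence.toList sentence)).reverse.foldl pvSplice
      (List.replicate sentence.toList.length "O")).length = sentence.toList.length := by
    rw [pv_applyB_length _ _ (fun sp h => by
      have := pv_spans_bounds sentence (pvDict kg_nodes).items sp h
      exact ⟨by simpa using this.1, this.2⟩)]
    exact List.length_replicate
  rw [pv_out_eq _ _ hblen]
  rfl

-- ===== VERDICT (by name: the statement is the Claim_ definition above) =====
theorem gpt_ner_sentence_to_bio_spec : Claim_equal_gpt_ner_sentence_to_bio := by
  intro sentence kg_nodes _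
  unfold Spec_gpt_ner_sentence_to_bio
  exact pv_main sentence kg_nodes
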